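-- pv_equiv track=rewrite | github.com/maboke123/P-O2 | Optimalisatie_startfile.py | getLegalNeighbours
-- ===== SOURCE A (Python) =====
-- def getLegalNeighbours(board,pos):
--     # Grenzen van het bord bepalen
--     max_rows = len(board)
--     max_colums = len(board[1])
--
--     # Zorgen dat pos altijd een tuple is
--     if isinstance(pos, list) and len(pos) == 1 and isinstance(pos[0], tuple):
--         pos = pos[0]
--
--     if pos == 0:
--         return 1
--
--     legal_neighbours = []
--
--     if isinstance(pos,tuple):
--         neighbours_x = [pos[0] - 1, pos[0], pos[0] + 1]
--         neighbours_y = [pos[1] - 1, pos[1], pos[1] + 1]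
--
--         # loopen over alle posities rond start positie
--         for i in neighbours_x:
--             for j in neighbours_y:
--
--                 # Eigen positie niet meetellen
--                 if i == pos[0] and j == pos[1]:
--                     legal_neighbours = legal_neighbours
--
--                 # Checken of waarde buiten de grenzen van het bord liggen
--                 elif i < 0 or i >= max_rows:
--                     legal_neighbours = legal_neighbours
--
--                 elif j < 0 or j >= max_colums:
--                     legal_neighbours = legal_neighbours
--
--                 # Checken of de buur een rode pin is
--                 elif board[i][j] == "R":
--                     legal_neighbours = legal_neighbours
--
--                 # Diagonale posities er uit halen
--                 elif (i == pos[0] - 1 and j == pos[1] - 1) or (i == pos[0] + 1 and j == pos[1] + 1) or (i == pos[0] - 1 and j == pos[1] + 1) or (i == pos[0] + 1 and j == pos[1] - 1):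
--                     legal_neighbours = legal_neighbours
--
--                 # Koppel van geldige buur samenzetten per koppel en in een lijst
--                 else:
--                     legal_neighbours.append((i,j))
--     return legal_neighbours
-- ===== SOURCE B (Python) =====
-- def getLegalNeighbours(board, pos):
--     max_rows = len(board)
--     max_colums = len(board[1])
--     r, c = pos
--     legal_neighbours = []
--     # the four orthogonal candidates, in the order A's 3x3 scan emits them
--     for i, j in ((r - 1, c), (r, c - 1), (r, c + 1), (r + 1, c)):
--         if 0 <= i < max_rows and 0 <= j < max_colums and board[i][j] != "R":
--             legal_neighbours.append((i, j))
--     return legal_neighbours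
-- ===== Notes on version B (the rewrite author's own statement) =====
-- stated objective: simpler
-- what changed: Replaces the 3x3 nested scan with its self/diagonal/bounds branch chain by a flat pass over the four orthogonal candidate cells with one combined bounds-and-not-red test.
import Mathlib
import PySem

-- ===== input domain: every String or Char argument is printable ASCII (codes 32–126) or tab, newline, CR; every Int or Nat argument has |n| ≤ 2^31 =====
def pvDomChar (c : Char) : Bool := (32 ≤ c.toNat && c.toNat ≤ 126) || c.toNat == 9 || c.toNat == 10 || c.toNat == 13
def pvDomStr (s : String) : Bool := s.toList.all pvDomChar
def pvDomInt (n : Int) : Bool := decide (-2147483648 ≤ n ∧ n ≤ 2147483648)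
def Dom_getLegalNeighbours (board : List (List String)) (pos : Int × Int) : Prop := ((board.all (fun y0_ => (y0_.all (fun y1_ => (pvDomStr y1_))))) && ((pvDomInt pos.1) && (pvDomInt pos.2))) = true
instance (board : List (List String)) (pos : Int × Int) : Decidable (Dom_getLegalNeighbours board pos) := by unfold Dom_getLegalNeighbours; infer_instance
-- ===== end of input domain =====

-- B replaces A's 3x3 nested scan (self/bounds/red/diagonal branch chain) by a flat pass
-- over the four orthogonal candidates with one combined test; objective: simpler.

-- board[i][j] (both Pythons only evaluate it with i, j in range; "" is a never-used total default)
def pvCell (board : List (List String)) (i j : Int) : String :=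
  PySem.List.pyGet? ((PySem.List.pyGet? board i).getD []) j |>.getD ""

-- ===== PORT A =====
-- Under the typed signature pos is always a pair of ints, so A's sanitising branches
-- (list-of-one-tuple unwrap, 'pos == 0 → return 1', non-tuple fall-through) are unreachable
-- and are not ported.
def getLegalNeighbours (board : List (List String)) (pos : Int × Int) : List (Int × Int) :=
  let max_rows : Int := board.length
  let max_colums : Int := ((PySem.List.pyGet? board 1).getD []).length
  let neighbours_x : List Int := [pos.1 - 1, pos.1, pos.1 + 1]
  let neighbours_y : List Int := [pos.2 - 1, pos.2, pos.2 + 1]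
  neighbours_x.foldl (fun acc i =>
    neighbours_y.foldl (fun acc j =>
      if i = pos.1 ∧ j = pos.2 then acc
      else if i < 0 ∨ max_rows ≤ i then acc
      else if j < 0 ∨ max_colums ≤ j then acc
      else if pvCell board i j = "R" then acc
      else if (i = pos.1 - 1 ∧ j = pos.2 - 1) ∨ (i = pos.1 + 1 ∧ j = pos.2 + 1) ∨
              (i = pos.1 - 1 ∧ j = pos.2 + 1) ∨ (i = pos.1 + 1 ∧ j = pos.2 - 1) then acc
      else acc ++ [(i, j)]) acc) []

-- ===== PORT B =====
def getLegalNeighbours_alt (board : List (List String)) (pos : Int × Int) : List (Int × Int) :=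
  let max_rows : Int := board.length
  let max_colums : Int := ((PySem.List.pyGet? board 1).getD []).length
  ([(pos.1 - 1, pos.2), (pos.1, pos.2 - 1), (pos.1, pos.2 + 1), (pos.1 + 1, pos.2)] : List (Int × Int)).foldl
    (fun acc c =>
      if 0 ≤ c.1 ∧ c.1 < max_rows ∧ 0 ≤ c.2 ∧ c.2 < max_colums ∧ pvCell board c.1 c.2 ≠ "R"
      then acc ++ [c] else acc) []

-- ===== PRECONDITION & SPEC =====
-- Pre_ = exactly the inputs on which Python A returns: the board has at least 2 rows
-- (len(board[1]) raises otherwise) and every non-self neighbour cell that passes A's bounds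
-- checks (row < len(board), column < len(board[1])) actually exists in its own row
-- (board[i][j] raises IndexError on shorter ragged rows).
def Pre_getLegalNeighbours (board : List (List String)) (pos : Int × Int) : Prop :=
  2 ≤ board.length ∧
  ∀ d ∈ ([(-1, -1), (-1, 0), (-1, 1), (0, -1), (0, 1), (1, -1), (1, 0), (1, 1)] : List (Int × Int)),
    (0 ≤ pos.1 + d.1 ∧ pos.1 + d.1 < (board.length : Int) ∧
     0 ≤ pos.2 + d.2 ∧ pos.2 + d.2 < (((PySem.List.pyGet? board 1).getD []).length : Int)) →
    pos.2 + d.2 < (((PySem.List.pyGet? board (pos.1 + d.1)).getD []).length : Int)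
instance (board : List (List String)) (pos : Int × Int) : Decidable (Pre_getLegalNeighbours board pos) := by unfold Pre_getLegalNeighbours; infer_instance

def pvWitness_getLegalNeighbours : List (List String) × (Int × Int) := ([["G", "R"], ["G", "G"]], (0, 0))

def Spec_getLegalNeighbours (board : List (List String)) (pos : Int × Int) (out : List (Int × Int)) : Prop := out = getLegalNeighbours_alt board pos
instance (board : List (List String)) (pos : Int × Int) (out : List (Int × Int)) : Decidable (Spec_getLegalNeighbours board pos out) := by unfold Spec_getLegalNeighbours; infer_instance

-- ===== CLAIM (what is proved, stated in full; the proofs are below) =====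
def Claim_equal_getLegalNeighbours : Prop := ∀ (board : List (List String)) (pos : Int × Int), Dom_getLegalNeighbours board pos → Pre_getLegalNeighbours board pos → Spec_getLegalNeighbours board pos (getLegalNeighbours board pos)

-- ===== LEMMAS AND PROOFS =====

-- one iteration of A's inner loop body
def pvStepA (board : List (List String)) (pos : Int × Int) (mr mc : Int)
    (acc : List (Int × Int)) (i j : Int) : List (Int × Int) :=
  if i = pos.1 ∧ j = pos.2 then acc
  else if i < 0 ∨ mr ≤ i then acc
  else if j < 0 ∨ mc ≤ j then acc
  else if pvCell board i j = "R" then acc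
  else if (i = pos.1 - 1 ∧ j = pos.2 - 1) ∨ (i = pos.1 + 1 ∧ j = pos.2 + 1) ∨
          (i = pos.1 - 1 ∧ j = pos.2 + 1) ∨ (i = pos.1 + 1 ∧ j = pos.2 - 1) then acc
  else acc ++ [(i, j)]

-- one iteration of B's loop body
def pvStepB (board : List (List String)) (mr mc : Int)
    (acc : List (Int × Int)) (c : Int × Int) : List (Int × Int) :=
  if 0 ≤ c.1 ∧ c.1 < mr ∧ 0 ≤ c.2 ∧ c.2 < mc ∧ pvCell board c.1 c.2 ≠ "R"
  then acc ++ [c] else acc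

lemma pvStepA_self (board pos mr mc acc) :
    pvStepA board pos mr mc acc pos.1 pos.2 = acc := by
  simp [pvStepA]

lemma pvStepA_diag (board pos mr mc acc) (i j : Int)
    (h : (i = pos.1 - 1 ∨ i = pos.1 + 1) ∧ (j = pos.2 - 1 ∨ j = pos.2 + 1)) :
    pvStepA board pos mr mc acc i j = acc := by
  unfold pvStepA
  split_ifs with h1 h2 h3 h4 h5 <;> try rfl
  exact absurd rfl (by rcases h with ⟨hi | hi, hj | hj⟩ <;> subst hi <;> subst hj <;> tauto)

lemma pvStepA_orth (board pos mr mc acc) (i j : Int)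
    (h : (i = pos.1 ∧ (j = pos.2 - 1 ∨ j = pos.2 + 1)) ∨ (j = pos.2 ∧ (i = pos.1 - 1 ∨ i = pos.1 + 1))) :
    pvStepA board pos mr mc acc i j = pvStepB board mr mc acc (i, j) := by
  unfold pvStepA pvStepB
  split_ifs with h1 h2 h3 h4 h5 h6 <;> try rfl
  all_goals exfalso
  all_goals rcases h with ⟨hi, hj | hj⟩ | ⟨hj, hi | hi⟩ <;> subst hi <;> subst hj <;> simp_all <;> omega

-- ===== VERDICT (by name: the statement is the Claim_ definition above) =====
theorem getLegalNeighbours_spec : Claim_equal_getLegalNeighbours := by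
  intro board pos _ _
  show getLegalNeighbours board pos = getLegalNeighbours_alt board pos
  have key : ∀ (mr mc : Int),
      (pvStepA board pos mr mc (pvStepA board pos mr mc (pvStepA board pos mr mc (pvStepA board pos mr mc (pvStepA board pos mr mc (pvStepA board pos mr mc (pvStepA board pos mr mc (pvStepA board pos mr mc (pvStepA board pos mr mc [] (pos.1 - 1) (pos.2 - 1)) (pos.1 - 1) (pos.2)) (pos.1 - 1) (pos.2 + 1)) (pos.1) (pos.2 - 1)) (pos.1) (pos.2)) (pos.1) (pos.2 + 1)) (pos.1 + 1) (pos.2 - 1)) (pos.1 + 1) (pos.2)) (pos.1 + 1) (pos.2 + 1)) = (pvStepB board mr mc (pvStepB board mr mc (pvStepB board mr mc (pvStepB board mr mc [] ((pos.1 - 1), (pos.2))) ((pos.1), (pos.2 - 1))) ((pos.1), (pos.2 + 1))) ((pos.1 + 1), (pos.2))) := by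
    intro mr mc
    rw [pvStepA_diag board pos mr mc _ (pos.1 - 1) (pos.2 - 1) (by omega),
        pvStepA_orth board pos mr mc _ (pos.1 - 1) (pos.2) (by omega),
        pvStepA_diag board pos mr mc _ (pos.1 - 1) (pos.2 + 1) (by omega),
        pvStepA_orth board pos mr mc _ (pos.1) (pos.2 - 1) (by omega),
        pvStepA_self board pos mr mc _,
        pvStepA_orth board pos mr mc _ (pos.1) (pos.2 + 1) (by omega),
        pvStepA_diag board pos mr mc _ (pos.1 + 1) (pos.2 - 1) (by omega),
        pvStepA_orth board pos mr mc _ (pos.1 + 1) (pos.2) (by omega),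
        pvStepA_diag board pos mr mc _ (pos.1 + 1) (pos.2 + 1) (by omega)]
  exact key (board.length : Int) (((PySem.List.pyGet? board 1).getD []).length : Int)
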